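-- pv_equiv track=rewrite | github.com/kclapper/MCODE-Isotope | mcode_isotope.py | card_search
-- ===== SOURCE A (Python) =====
-- def strip_space(space_list):
--     new_list = []
--     for entry in space_list:
--         if entry != "":
--             new_list.append(entry)
--     return new_list
--
-- def card_search(lines, start="material", stop="material", alt_stop="name", i=0):
--     """
--     Takes in entire set of lines, returns only the first chunk between the given
--     start and stop values.
--     Default is to start at beginning of line file, change i to start later
--     Assumes start/stop flags are first entry in line.
--     Includes start flag line in chunk, but not end flag line.
--     Default alternate stop is next name line of successive card but will also stop at EOF
--     Chunk is formatted as list of lines as lists stripped of spaces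
--     """
--     chunk = []
--     flag = False
--     for line in lines[i::]:
--         line_list = line.rstrip().split(" ")
--         if len(line_list) == 0:
--             check = "\n"
--
--         else:
--             check = line_list[0]
--
--         if check == start:
--             flag = True
--             start = None # Effectively ignore start flag after finding it
--
--         elif check == stop:
--             flag = False
--             break # only take a single chunk between the two flags
--
--         elif check == alt_stop:
--             flag = False
--             break
--
--         while flag == True:
--             chunk.append(strip_space(line_list))
--             break
--
--     return chunk
-- ===== SOURCE B (Python) =====
-- def strip_space(space_list):
--     return [entry for entry in space_list if entry != ""]
--
-- def card_search(lines, start="material", stop="material", alt_stop="name", i=0):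
--     toks = [line.rstrip().split(" ") for line in lines[i:]]
--     for j, t in enumerate(toks):
--         if t[0] == start:
--             chunk = [strip_space(t)]
--             for u in toks[j + 1:]:
--                 if u[0] == stop or u[0] == alt_stop:
--                     break
--                 chunk.append(strip_space(u))
--             return chunk
--         if t[0] == stop or t[0] == alt_stop:
--             return []
--     return []
-- ===== Notes on version B (the rewrite author's own statement) =====
-- stated objective: simpler
-- what changed: Replaced A's single loop with a toggling flag and mutated start sentinel by a two-phase scan: locate the first line whose first token is start (returning [] if a stop/alt_stop token comes first), then collect stripped token lines until a stop/alt_stop token or EOF.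
import Mathlib
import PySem

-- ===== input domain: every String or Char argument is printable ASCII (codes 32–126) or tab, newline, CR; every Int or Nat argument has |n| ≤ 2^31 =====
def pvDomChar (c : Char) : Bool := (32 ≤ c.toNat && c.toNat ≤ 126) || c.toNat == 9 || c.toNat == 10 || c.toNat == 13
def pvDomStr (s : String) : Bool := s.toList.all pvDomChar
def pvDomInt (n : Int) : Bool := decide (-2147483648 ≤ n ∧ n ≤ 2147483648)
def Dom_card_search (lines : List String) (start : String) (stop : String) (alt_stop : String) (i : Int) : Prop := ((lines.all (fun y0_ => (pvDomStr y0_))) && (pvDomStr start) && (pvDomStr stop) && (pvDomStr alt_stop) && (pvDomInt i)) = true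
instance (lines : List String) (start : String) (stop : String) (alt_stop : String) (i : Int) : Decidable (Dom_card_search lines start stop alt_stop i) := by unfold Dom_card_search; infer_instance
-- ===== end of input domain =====

-- B replaces A's single toggling-flag loop by a locate phase (find the start line) and a
-- collect phase (take lines until a stop/alt_stop token or EOF); objective: simpler.

-- ===== PORT A =====
-- strip_space: the accumulator loop of A, literally.
def strip_space (space_list : List String) : List String :=
  space_list.foldl (fun new_list entry => if entry ≠ "" then new_list ++ [entry] else new_list) []

-- A's for-loop: state is (start, flag, chunk); flag = True exactly when start has been
-- set to None, so the state carries startOpt (some s before the start flag, none after).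
def csLoopA (stop alt_stop : String) : Option String → List (List String) → List String → List (List String)
  | _, chunk, [] => chunk
  | startOpt, chunk, line :: rest =>
    let line_list := (PySem.Str.split? (PySem.Str.rstrip line) " ").getD []
    let check := if line_list.length = 0 then "\n" else line_list.headD ""
    if startOpt = some check then
      csLoopA stop alt_stop none (chunk ++ [strip_space line_list]) rest
    else if check = stop then chunk
    else if check = alt_stop then chunk
    else if startOpt = none then
      csLoopA stop alt_stop none (chunk ++ [strip_space line_list]) rest
    else
      csLoopA stop alt_stop startOpt chunk rest

def card_search (lines : List String) (start : String) (stop : String) (alt_stop : String) (i : Int) : List (List String) :=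
  csLoopA stop alt_stop (some start) [] (PySem.List.slice lines (some i) none)

-- ===== PORT B =====
def stripB (space_list : List String) : List String :=
  space_list.filter (fun e => e ≠ "")

-- line.rstrip().split(" ")
def tokB (line : String) : List String :=
  (PySem.Str.split? (PySem.Str.rstrip line) " ").getD []

-- collect phase: take token-lists until one starts with stop/alt_stop (t[0]; split(" ")
-- is never empty, so headD "" is exact)
def collectB (stop alt_stop : String) : List (List String) → List (List String)
  | [] => []
  | u :: rest =>
    if u.headD "" = stop ∨ u.headD "" = alt_stop then []
    else stripB u :: collectB stop alt_stop rest

-- locate phase: find the first line whose first token is start (collect from there) or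
-- stop/alt_stop (empty chunk)
def locateB (start stop alt_stop : String) : List (List String) → List (List String)
  | [] => []
  | t :: rest =>
    if t.headD "" = start then stripB t :: collectB stop alt_stop rest
    else if t.headD "" = stop ∨ t.headD "" = alt_stop then []
    else locateB start stop alt_stop rest

def card_search_alt (lines : List String) (start : String) (stop : String) (alt_stop : String) (i : Int) : List (List String) :=
  locateB start stop alt_stop ((PySem.List.slice lines (some i) none).map tokB)

-- ===== PRECONDITION & SPEC =====
def Spec_card_search (lines : List String) (start : String) (stop : String) (alt_stop : String) (i : Int) (out : List (List String)) : Prop := out = card_search_alt lines start stop alt_stop i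
instance (lines : List String) (start : String) (stop : String) (alt_stop : String) (i : Int) (out : List (List String)) : Decidable (Spec_card_search lines start stop alt_stop i out) := by unfold Spec_card_search; infer_instance

-- ===== CLAIM (what is proved, stated in full; the proofs are below) =====
def Claim_equal_card_search : Prop := ∀ (lines : List String) (start : String) (stop : String) (alt_stop : String) (i : Int), Dom_card_search lines start stop alt_stop i → Spec_card_search lines start stop alt_stop i (card_search lines start stop alt_stop i)

-- ===== LEMMAS AND PROOFS =====

theorem splitOn_go_ne_nil (sep : List Char) (fuel : Nat) (l cur : List Char) (acc : List (List Char)) :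
    PySem.Chars.splitOn.go sep fuel l cur acc ≠ [] := by
  induction fuel generalizing l cur acc with
  | zero => simp [PySem.Chars.splitOn.go]
  | succ n ih =>
    cases l with
    | nil => simp [PySem.Chars.splitOn.go]
    | cons c rest =>
      rw [PySem.Chars.splitOn.go]
      split <;> exact ih _ _ _

theorem tokB_ne_nil (line : String) : tokB line ≠ [] := by
  unfold tokB
  simp [PySem.Str.split?, PySem.Chars.split?, PySem.Chars.splitOn]
  exact splitOn_go_ne_nil _ _ _ _ _

theorem strip_space_eq (l : List String) : strip_space l = stripB l := by
  unfold strip_space stripB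
  suffices h : ∀ acc : List String,
      l.foldl (fun new_list entry => if entry ≠ "" then new_list ++ [entry] else new_list) acc
        = acc ++ l.filter (fun e => e ≠ "") by
    simpa using h []
  induction l with
  | nil => intro acc; simp
  | cons x xs ih =>
    intro acc
    rw [List.foldl_cons, List.filter_cons]
    by_cases hx : x = ""
    · rw [if_neg (by simp [hx]), if_neg (by simp [hx])]
      exact ih acc
    · rw [if_pos (by simp [hx]), if_pos (by simp [hx]), ih (acc ++ [x])]
      simp

theorem collect_eq (stop alt_stop : String) (ls : List String) :
    ∀ chunk, csLoopA stop alt_stop none chunk ls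
      = chunk ++ collectB stop alt_stop (ls.map tokB) := by
  induction ls with
  | nil => intro chunk; simp [csLoopA, collectB]
  | cons line rest ih =>
    intro chunk
    have hne := tokB_ne_nil line
    obtain ⟨a, t', ht⟩ := List.exists_cons_of_ne_nil hne
    rw [List.map_cons]
    simp only [csLoopA, tokB] at ht ⊢
    rw [ht]
    by_cases hs : a = stop
    · simp [hs, collectB]
    · by_cases ha : a = alt_stop
      · simp [ha, collectB]
      · simp [hs, ha, collectB, ih, strip_space_eq]

theorem locate_eq (start stop alt_stop : String) (ls : List String) :
    csLoopA stop alt_stop (some start) [] ls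
      = locateB start stop alt_stop (ls.map tokB) := by
  induction ls with
  | nil => simp [csLoopA, locateB]
  | cons line rest ih =>
    have hne := tokB_ne_nil line
    obtain ⟨a, t', ht⟩ := List.exists_cons_of_ne_nil hne
    rw [List.map_cons]
    simp only [csLoopA, tokB] at ht ⊢
    rw [ht]
    by_cases hst : a = start
    · simp [hst, locateB, collect_eq, strip_space_eq]
    · by_cases hs : a = stop
      · subst hs
        simp [locateB, show ¬ start = a from fun h => hst h.symm, hst]
      · by_cases ha : a = alt_stop
        · subst ha
          simp [locateB, show ¬ start = a from fun h => hst h.symm, hst, hs]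
        · simp [hst, hs, ha, locateB, show ¬ start = a from fun h => hst h.symm, ih]

-- ===== VERDICT (by name: the statement is the Claim_ definition above) =====
theorem card_search_spec : Claim_equal_card_search := by
  intro lines start stop alt_stop i _
  unfold Spec_card_search card_search card_search_alt
  exact locate_eq start stop alt_stop _
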